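-- pv_equiv track=rewrite | github.com/bozi6/hello-world | 14nezoter/14_nezoter.py | szamol_egyedulallo_helyek
-- ===== SOURCE A (Python) =====
-- from typing import List, Dict, Tuple
--
-- SZABAD_JEL = 'o'
--
-- def szamol_egyedulallo_helyek(nezoter: List[List[List[str]]]) -> int:
--     """Egyedülálló üres helyek számolása."""
--     egyeduliek = 0
--     for sor in nezoter:
--         ures_szakasz = 0
--         for szek in sor:
--             if szek[0] == SZABAD_JEL:
--                 ures_szakasz += 1
--             else:
--                 if ures_szakasz == 1:
--                     egyeduliek += 1
--                 ures_szakasz = 0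
--         if ures_szakasz == 1:
--             egyeduliek += 1
--     return egyeduliek
-- ===== SOURCE B (Python) =====
-- from typing import List
--
-- SZABAD_JEL = 'o'
--
-- def szamol_egyedulallo_helyek(nezoter: List[List[List[str]]]) -> int:
--     """Egyedulallo ures helyek szamolasa: per-seat neighborhood check."""
--     osszes = 0
--     for sor in nezoter:
--         ures = [szek[0] == SZABAD_JEL for szek in sor]
--         for elozo, akt, kov in zip([False] + ures, ures, ures[1:] + [False]):
--             if akt and not elozo and not kov:
--                 osszes += 1
--     return osszes
-- ===== Notes on version B (the rewrite author's own statement) =====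
-- stated objective: alternative
-- what changed: Replaced the run-length accumulator scan (count a run when it closes at length 1) by a stateless per-seat neighborhood test: a seat counts iff it is empty and neither neighbor (out-of-bounds treated as occupied) is empty.
import Mathlib
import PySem

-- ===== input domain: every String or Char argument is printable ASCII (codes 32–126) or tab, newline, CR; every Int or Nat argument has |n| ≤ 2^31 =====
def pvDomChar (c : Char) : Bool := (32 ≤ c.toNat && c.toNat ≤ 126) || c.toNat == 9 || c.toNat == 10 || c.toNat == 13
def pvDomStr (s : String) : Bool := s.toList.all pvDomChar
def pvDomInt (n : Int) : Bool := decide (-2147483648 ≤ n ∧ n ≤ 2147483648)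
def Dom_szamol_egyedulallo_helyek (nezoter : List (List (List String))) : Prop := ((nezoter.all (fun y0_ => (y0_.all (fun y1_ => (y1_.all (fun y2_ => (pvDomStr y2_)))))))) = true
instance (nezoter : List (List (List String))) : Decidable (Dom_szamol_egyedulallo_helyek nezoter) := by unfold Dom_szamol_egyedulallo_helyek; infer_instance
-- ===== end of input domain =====

-- B replaces the run-length accumulator by a stateless per-seat neighborhood test (alternative decomposition, same cost).

-- ===== PORT A =====
-- literal transliteration of A: per row, fold with state (ures_szakasz, egyeduliek)
def szamol_egyedulallo_helyek (nezoter : List (List (List String))) : Int :=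
  nezoter.foldl (fun egyeduliek sor =>
    let r := sor.foldl (fun (st : Int × Int) szek =>
        if PySem.List.pyGet? szek 0 = some "o" then (st.1 + 1, st.2)
        else (0, if st.1 = 1 then st.2 + 1 else st.2))
      ((0 : Int), egyeduliek)
    if r.1 = 1 then r.2 + 1 else r.2) 0

-- ===== PORT B =====
-- the zip([False]+ures, ures, ures[1:]+[False]) pass of Source B: prev carried, next is head of the rest (or False)
def pvRowIso : Bool → List Bool → Int
  | _, [] => 0
  | elozo, akt :: rest =>
      (if akt && !elozo && !(rest.headD false) then 1 else 0) + pvRowIso akt rest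

def szamol_egyedulallo_helyek_alt (nezoter : List (List (List String))) : Int :=
  nezoter.foldl (fun osszes sor =>
    osszes + pvRowIso false (sor.map (fun szek => PySem.List.pyGet? szek 0 == some "o"))) 0

-- ===== PRECONDITION & SPEC =====
-- Pre_ excludes inputs where A raises IndexError (szek[0] on an empty seat list); B raises there too.
def Pre_szamol_egyedulallo_helyek (nezoter : List (List (List String))) : Prop :=
  ∀ sor ∈ nezoter, ∀ szek ∈ sor, szek ≠ []
instance (nezoter : List (List (List String))) : Decidable (Pre_szamol_egyedulallo_helyek nezoter) := by unfold Pre_szamol_egyedulallo_helyek; infer_instance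
def pvWitness_szamol_egyedulallo_helyek : List (List (List String)) :=
  [[["o"], ["x"], ["o"], ["o"], ["x"]], [["o"]]]
def Spec_szamol_egyedulallo_helyek (nezoter : List (List (List String))) (out : Int) : Prop := out = szamol_egyedulallo_helyek_alt nezoter
instance (nezoter : List (List (List String))) (out : Int) : Decidable (Spec_szamol_egyedulallo_helyek nezoter out) := by unfold Spec_szamol_egyedulallo_helyek; infer_instance

-- ===== CLAIM (what is proved, stated in full; the proofs are below) =====
def Claim_equal_szamol_egyedulallo_helyek : Prop := ∀ (nezoter : List (List (List String))), Dom_szamol_egyedulallo_helyek nezoter → Pre_szamol_egyedulallo_helyek nezoter → Spec_szamol_egyedulallo_helyek nezoter (szamol_egyedulallo_helyek nezoter)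

-- ===== LEMMAS AND PROOFS =====

-- key row lemma: A's run-length fold over the emptiness flags equals acc plus B's neighborhood count
theorem pvRow_eq (l : List Bool) : ∀ (e acc : Int), 0 ≤ e →
    (let r := l.foldl (fun (st : Int × Int) b =>
        if b then (st.1 + 1, st.2) else (0, if st.1 = 1 then st.2 + 1 else st.2)) (e, acc)
     if r.1 = 1 then r.2 + 1 else r.2)
    = acc + pvRowIso (e != 0) l + (if e = 1 ∧ l.headD false = false then 1 else 0) := by
  induction l with
  | nil =>
      intro e acc _
      simp [pvRowIso]
      split_ifs <;> simp_all <;> omega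
  | cons b rest ih =>
      intro e acc he
      cases b with
      | true =>
          have h := ih (e + 1) acc (by omega)
          simp only [List.foldl_cons, if_true] at *
          rw [h]
          have hne : ((e + 1) != 0) = true := by simp; omega
          rw [hne]
          simp only [pvRowIso, List.headD]
          by_cases h0 : e = 0
          · subst h0
            simp
            split_ifs <;> simp_all <;> omega
          · have : (e != 0) = true := by simp [h0]
            rw [this]
            simp
            intro h'
            exact absurd h' h0
      | false =>
          have h := ih 0 (if e = 1 then acc + 1 else acc) (by omega)
          simp only [List.foldl_cons, Bool.false_eq_true, if_false] at *
          rw [h]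
          simp only [pvRowIso, List.headD]
          have : ((0 : Int) != 0) = false := by simp
          rw [this]
          simp
          split_ifs <;> simp_all <;> omega

-- the outer folds agree given the row lemma
theorem pvOuter (rows : List (List (List String))) : ∀ (acc : Int),
    rows.foldl (fun egyeduliek sor =>
      let r := sor.foldl (fun (st : Int × Int) szek =>
          if PySem.List.pyGet? szek 0 = some "o" then (st.1 + 1, st.2)
          else (0, if st.1 = 1 then st.2 + 1 else st.2)) ((0 : Int), egyeduliek)
      if r.1 = 1 then r.2 + 1 else r.2) acc
    = rows.foldl (fun osszes sor =>
      osszes + pvRowIso false (sor.map (fun szek => PySem.List.pyGet? szek 0 == some "o"))) acc := by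
  induction rows with
  | nil => intro acc; rfl
  | cons sor rs ih =>
      intro acc
      simp only [List.foldl_cons]
      rw [ih]
      congr 1
      have h := pvRow_eq (sor.map (fun szek => PySem.List.pyGet? szek 0 == some "o")) 0 acc le_rfl
      simp only at h
      rw [List.foldl_map] at h
      simp only [beq_iff_eq] at h ⊢
      rw [h]
      simp

theorem szamol_egyedulallo_helyek_spec : Claim_equal_szamol_egyedulallo_helyek := by
  intro nezoter _ _
  unfold Spec_szamol_egyedulallo_helyek szamol_egyedulallo_helyek szamol_egyedulallo_helyek_alt
  exact pvOuter nezoter 0
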